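-- pv_equiv track=rewrite | github.com/hi-im-gabriel/beecrowd | 2508.py | res
-- ===== SOURCE A (Python) =====
-- import string
--
-- alfa=list(string.ascii_lowercase)
--
-- def res(s):
--    soma=0
--    for c in s:
--       if c>='j' and c<='r':aux=alfa.index(c)-9+1
--       elif c>='s' and c<='z':aux=alfa.index(c)-18+1
--       elif c>='a' and c<='i':aux=alfa.index(c)+1
--       else:aux=0
--       soma+=aux
--    return soma
-- ===== SOURCE B (Python) =====
-- def res(s):
--     # Stage 1: count character frequencies once.
--     counts = {}
--     for c in s:
--         counts[c] = counts.get(c, 0) + 1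
--     # Stage 2: sum value * frequency over the fixed value-groups
--     # (letters sharing the same keypad value v are at alphabet positions v-1, v+8, v+17).
--     groups = ["ajs", "bkt", "clu", "dmv", "enw", "fox", "gpy", "hqz", "ir"]
--     total = 0
--     for v, letters in enumerate(groups, start=1):
--         for ch in letters:
--             total += v * counts.get(ch, 0)
--     return total
-- ===== Notes on version B (the rewrite author's own statement) =====
-- stated objective: alternative
-- what changed: Replaces A's per-character branch cascade with linear alfa.index scans by a two-stage algorithm: one pass builds a character-frequency dictionary, then a second stage sums value*frequency over a fixed table of nine value-groups of letters.
import Mathlib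
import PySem

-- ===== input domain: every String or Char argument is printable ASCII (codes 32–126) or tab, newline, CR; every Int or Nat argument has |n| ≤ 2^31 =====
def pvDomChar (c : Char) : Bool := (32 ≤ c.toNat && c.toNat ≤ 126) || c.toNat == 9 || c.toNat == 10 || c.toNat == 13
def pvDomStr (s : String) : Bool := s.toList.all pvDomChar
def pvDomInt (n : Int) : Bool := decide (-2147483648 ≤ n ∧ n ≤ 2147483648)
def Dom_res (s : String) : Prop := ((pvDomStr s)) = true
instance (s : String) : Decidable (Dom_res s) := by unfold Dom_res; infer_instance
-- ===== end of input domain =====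

-- B replaces A's per-character branch cascade with linear alfa.index scans by a
-- two-stage algorithm: build a character-frequency dictionary in one pass, then
-- sum value * frequency over a fixed table of nine value-groups (alternative).

-- ===== PORT A =====
-- alfa = list(string.ascii_lowercase)
def alfa : List Char := ['a', 'b', 'c', 'd', 'e', 'f', 'g', 'h', 'i', 'j', 'k', 'l', 'm', 'n', 'o', 'p', 'q', 'r', 's', 't', 'u', 'v', 'w', 'x', 'y', 'z']

-- per-character aux of A; alfa.index only reached on chars present in alfa,
-- so the getD default is never used there
def resAux (c : Char) : Int :=
  if 'j' ≤ c ∧ c ≤ 'r' then ((PySem.List.index? alfa c).getD 0 : Int) - 9 + 1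
  else if 's' ≤ c ∧ c ≤ 'z' then ((PySem.List.index? alfa c).getD 0 : Int) - 18 + 1
  else if 'a' ≤ c ∧ c ≤ 'i' then ((PySem.List.index? alfa c).getD 0 : Int) + 1
  else 0

def res (s : String) : Int :=
  s.toList.foldl (fun soma c => soma + resAux c) 0

-- ===== PORT B =====
-- groups[v-1] holds the letters whose keypad value is v
def groupsB : List String := ["ajs", "bkt", "clu", "dmv", "enw", "fox", "gpy", "hqz", "ir"]

def res_alt (s : String) : Int :=
  let counts : PySem.Dict Char Int :=
    s.toList.foldl (fun d c => d.insert c (d.getD c 0 + 1)) PySem.Dict.empty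
  (PySem.List.enumerate groupsB 1).foldl (fun total p =>
    p.2.toList.foldl (fun t ch => t + p.1 * counts.getD ch 0) total) 0

-- ===== PRECONDITION & SPEC =====
def Spec_res (s : String) (out : Int) : Prop := out = res_alt s
instance (s : String) (out : Int) : Decidable (Spec_res s out) := by unfold Spec_res; infer_instance

-- ===== CLAIM (what is proved, stated in full; the proofs are below) =====
def Claim_equal_res : Prop := ∀ (s : String), Dom_res s → Spec_res s (res s)

-- ===== LEMMAS AND PROOFS =====

-- common linear form: the keypad value of each letter times its count
def lin (l : List Char) : Int :=
  1*((l.count 'a' : Int)+(l.count 'j' : Int)+(l.count 's' : Int)) +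
  2*((l.count 'b' : Int)+(l.count 'k' : Int)+(l.count 't' : Int)) +
  3*((l.count 'c' : Int)+(l.count 'l' : Int)+(l.count 'u' : Int)) +
  4*((l.count 'd' : Int)+(l.count 'm' : Int)+(l.count 'v' : Int)) +
  5*((l.count 'e' : Int)+(l.count 'n' : Int)+(l.count 'w' : Int)) +
  6*((l.count 'f' : Int)+(l.count 'o' : Int)+(l.count 'x' : Int)) +
  7*((l.count 'g' : Int)+(l.count 'p' : Int)+(l.count 'y' : Int)) +
  8*((l.count 'h' : Int)+(l.count 'q' : Int)+(l.count 'z' : Int)) +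
  9*((l.count 'i' : Int)+(l.count 'r' : Int))

theorem alt_eq (s : String) : res_alt s = lin s.toList := by
  unfold res_alt
  simp [groupsB, PySem.List.enumerate, PySem.Dict.getD_foldl_insert_add_one, lin]
  ring

theorem char_eq_iff_toNat (c d : Char) : c = d ↔ c.toNat = d.toNat := by
  constructor
  · intro h; rw [h]
  · intro h
    apply Char.ext
    exact UInt32.toNat_inj.mp h

theorem sum_eq (l : List Char) : (l.map resAux).sum = lin l := by
  induction l with
  | nil => decide
  | cons c t ih =>
    simp only [List.map_cons, List.sum_cons, ih]
    by_cases hc : c ∈ alfa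
    · have hv_a : resAux 'a' = 1 := by decide
      have hv_b : resAux 'b' = 2 := by decide
      have hv_c : resAux 'c' = 3 := by decide
      have hv_d : resAux 'd' = 4 := by decide
      have hv_e : resAux 'e' = 5 := by decide
      have hv_f : resAux 'f' = 6 := by decide
      have hv_g : resAux 'g' = 7 := by decide
      have hv_h : resAux 'h' = 8 := by decide
      have hv_i : resAux 'i' = 9 := by decide
      have hv_j : resAux 'j' = 1 := by decide
      have hv_k : resAux 'k' = 2 := by decide
      have hv_l : resAux 'l' = 3 := by decide
      have hv_m : resAux 'm' = 4 := by decide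
      have hv_n : resAux 'n' = 5 := by decide
      have hv_o : resAux 'o' = 6 := by decide
      have hv_p : resAux 'p' = 7 := by decide
      have hv_q : resAux 'q' = 8 := by decide
      have hv_r : resAux 'r' = 9 := by decide
      have hv_s : resAux 's' = 1 := by decide
      have hv_t : resAux 't' = 2 := by decide
      have hv_u : resAux 'u' = 3 := by decide
      have hv_v : resAux 'v' = 4 := by decide
      have hv_w : resAux 'w' = 5 := by decide
      have hv_x : resAux 'x' = 6 := by decide
      have hv_y : resAux 'y' = 7 := by decide
      have hv_z : resAux 'z' = 8 := by decide
      fin_cases hc <;> simp only [hv_a, hv_b, hv_c, hv_d, hv_e, hv_f, hv_g, hv_h, hv_i, hv_j, hv_k, hv_l, hv_m, hv_n, hv_o, hv_p, hv_q, hv_r, hv_s, hv_t, hv_u, hv_v, hv_w, hv_x, hv_y, hv_z] <;>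
        (simp [lin]; ring)
    · have hcount : ∀ ch ∈ alfa, List.count ch (c :: t) = List.count ch t :=
        fun ch h => List.count_cons_of_ne (a := ch) (b := c) (fun e : c = ch => hc (e ▸ h))
      have hz : resAux c = 0 := by
        simp only [alfa, List.mem_cons, List.not_mem_nil, or_false, not_or, char_eq_iff_toNat] at hc
        unfold resAux
        simp only [show ∀ a b : Char, (a ≤ b) = (a.toNat ≤ b.toNat) from fun _ _ => rfl,
          show ('a'.toNat) = 97 from rfl, show ('b'.toNat) = 98 from rfl, show ('c'.toNat) = 99 from rfl, show ('d'.toNat) = 100 from rfl, show ('e'.toNat) = 101 from rfl, show ('f'.toNat) = 102 from rfl, show ('g'.toNat) = 103 from rfl, show ('h'.toNat) = 104 from rfl, show ('i'.toNat) = 105 from rfl, show ('j'.toNat) = 106 from rfl, show ('k'.toNat) = 107 from rfl, show ('l'.toNat) = 108 from rfl, show ('m'.toNat) = 109 from rfl, show ('n'.toNat) = 110 from rfl, show ('o'.toNat) = 111 from rfl, show ('p'.toNat) = 112 from rfl, show ('q'.toNat) = 113 from rfl, show ('r'.toNat) = 114 from rfl, show ('s'.toNat) = 115 from rfl, show ('t'.toNat)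 = 116 from rfl, show ('u'.toNat) = 117 from rfl, show ('v'.toNat) = 118 from rfl, show ('w'.toNat) = 119 from rfl, show ('x'.toNat) = 120 from rfl, show ('y'.toNat) = 121 from rfl, show ('z'.toNat) = 122 from rfl] at hc ⊢
        split_ifs <;> omega
      rw [hz, zero_add]
      unfold lin
      rw [hcount 'a' (by decide),
          hcount 'b' (by decide),
          hcount 'c' (by decide),
          hcount 'd' (by decide),
          hcount 'e' (by decide),
          hcount 'f' (by decide),
          hcount 'g' (by decide),
          hcount 'h' (by decide),
          hcount 'i' (by decide),
          hcount 'j' (by decide),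
          hcount 'k' (by decide),
          hcount 'l' (by decide),
          hcount 'm' (by decide),
          hcount 'n' (by decide),
          hcount 'o' (by decide),
          hcount 'p' (by decide),
          hcount 'q' (by decide),
          hcount 'r' (by decide),
          hcount 's' (by decide),
          hcount 't' (by decide),
          hcount 'u' (by decide),
          hcount 'v' (by decide),
          hcount 'w' (by decide),
          hcount 'x' (by decide),
          hcount 'y' (by decide),
          hcount 'z' (by decide)]

theorem a_eq (l : List Char) : l.foldl (fun soma c => soma + resAux c) 0 = lin l := by
  rw [PySem.List.foldl_add, zero_add, sum_eq]

-- ===== VERDICT (by name: the statement is the Claim_ definition above) =====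
theorem res_spec : Claim_equal_res := by
  intro s _
  unfold Spec_res res
  rw [a_eq, alt_eq]
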